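-- pv_equiv track=rewrite | github.com/toras9000/kallithea-mirror | kallithea/lib/utils2.py | uri_filter
-- ===== SOURCE A (Python) =====
-- def uri_filter(uri):
--     """
--     Removes user:password from given url string
--
--     :param uri:
--     :rtype: str
--     :returns: filtered list of strings
--     """
--     if not uri:
--         return []
--
--     proto = ''
--
--     for pat in ('https://', 'http://', 'git://'):
--         if uri.startswith(pat):
--             uri = uri[len(pat):]
--             proto = pat
--             break
--
--     # remove passwords and username
--     uri = uri[uri.find('@') + 1:]
--
--     # get the port
--     cred_pos = uri.find(':')
--     if cred_pos == -1:
--         host, port = uri, None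
--     else:
--         host, port = uri[:cred_pos], uri[cred_pos + 1:]
--
--     return [_f for _f in [proto, host, port] if _f]
-- ===== SOURCE B (Python) =====
-- def uri_filter(uri):
--     if not uri:
--         return []
--     proto = next((p for p in ('https://', 'http://', 'git://') if uri.startswith(p)), '')
--     host = []
--     port = None
--     seen_at = False
--     # single left-to-right pass: the first '@' discards everything collected so far,
--     # the first ':' after that switches collection from host to port
--     for ch in uri[len(proto):]:
--         if ch == '@' and not seen_at:
--             seen_at = True
--             host = []
--             port = None
--         elif port is not None:
--             port.append(ch)
--         elif ch == ':':
--             port = []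
--         else:
--             host.append(ch)
--     parts = [proto, ''.join(host)]
--     if port is not None:
--         parts.append(''.join(port))
--     return [p for p in parts if p]
-- ===== Notes on version B (the rewrite author's own statement) =====
-- stated objective: alternative
-- what changed: Replaces A's staged slicing (find('@')+slice, find(':')+two slices, then a truthiness filter over proto/host/None-port) with a single left-to-right character scan driven by a three-state machine (credentials-reset on first '@', host/port switch on first ':') that accumulates host and port buffers in one pass.
import Mathlib
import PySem

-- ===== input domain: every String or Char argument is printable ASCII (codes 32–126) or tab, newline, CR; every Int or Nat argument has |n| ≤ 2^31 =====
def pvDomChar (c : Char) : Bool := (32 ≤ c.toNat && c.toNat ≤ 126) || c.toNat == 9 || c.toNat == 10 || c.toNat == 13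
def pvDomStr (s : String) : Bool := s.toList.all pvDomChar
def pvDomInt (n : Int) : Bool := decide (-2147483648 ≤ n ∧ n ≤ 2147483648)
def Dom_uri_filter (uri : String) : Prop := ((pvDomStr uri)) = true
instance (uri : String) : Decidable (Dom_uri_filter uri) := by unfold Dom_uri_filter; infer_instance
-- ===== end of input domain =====

-- B replaces A's staged find/slice passes with a single left-to-right character scan
-- (a small state machine accumulating host/port buffers); return values agree on all inputs.

-- ===== PORT A =====
-- the 'for pat in (…): if uri.startswith(pat): …; break' loop: returns (uri after strip, proto)
def pvAStrip : List String → String → String × String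
  | [], uri => (uri, "")
  | pat :: rest, uri =>
    if PySem.Str.startswith uri pat then
      (PySem.Str.slice uri (some (PySem.Str.len pat)) none, pat)
    else pvAStrip rest uri

def uri_filter (uri : String) : List String :=
  if uri = "" then []
  else
    let sp := pvAStrip ["https://", "http://", "git://"] uri
    let uri1 := sp.1
    let proto := sp.2
    let uri2 := PySem.Str.slice uri1 (some (PySem.Str.find uri1 "@" + 1)) none
    let credPos := PySem.Str.find uri2 ":"
    let hp : String × Option String :=
      if credPos = -1 then (uri2, none)
      else (PySem.Str.slice uri2 none (some credPos),
            some (PySem.Str.slice uri2 (some (credPos + 1)) none))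
    -- [_f for _f in [proto, host, port] if _f]  (None and '' are falsy)
    ([some proto, some hp.1, hp.2]).filterMap
      (fun o => match o with
        | none => none
        | some s => if s = "" then none else some s)

-- ===== PORT B =====
-- next((p for p in pats if uri.startswith(p)), '')
def pvBProto : List String → String → String
  | [], _ => ""
  | p :: rest, uri => if PySem.Str.startswith uri p then p else pvBProto rest uri

-- the for-loop over the characters: state (seen_at, host, port); port = none means 'port is None'
def pvScan : List Char → Bool → List Char → Option (List Char) → List Char × Option (List Char)
  | [], _, host, port => (host, port)
  | c :: cs, seenAt, host, port =>
    if c = '@' ∧ seenAt = false then pvScan cs true [] none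
    else match port with
      | some p => pvScan cs seenAt host (some (p ++ [c]))
      | none =>
        if c = ':' then pvScan cs seenAt host (some [])
        else pvScan cs seenAt (host ++ [c]) none

def uri_filter_alt (uri : String) : List String :=
  if uri = "" then []
  else
    let proto := pvBProto ["https://", "http://", "git://"] uri
    let rest := PySem.Str.slice uri (some (PySem.Str.len proto)) none
    let hp := pvScan rest.toList false [] none
    let parts := [proto, String.ofList hp.1] ++
      (match hp.2 with | some p => [String.ofList p] | none => [])
    parts.filter (fun s => s ≠ "")

-- ===== PRECONDITION & SPEC =====
def Spec_uri_filter (uri : String) (out : List String) : Prop := out = uri_filter_alt uri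
instance (uri : String) (out : List String) : Decidable (Spec_uri_filter uri out) := by unfold Spec_uri_filter; infer_instance

-- ===== CLAIM (what is proved, stated in full; the proofs are below) =====
def Claim_equal_uri_filter : Prop := ∀ (uri : String), Dom_uri_filter uri → Spec_uri_filter uri (uri_filter uri)

-- ===== LEMMAS AND PROOFS =====

-- A's strip loop and B's proto pick compute the same pair
theorem pvStrip_eq (pats : List String) (uri : String) :
    pvAStrip pats uri =
      (PySem.Str.slice uri (some (PySem.Str.len (pvBProto pats uri))) none,
       pvBProto pats uri) := by
  induction pats with
  | nil =>
    simp only [pvAStrip, pvBProto, Prod.mk.injEq, and_true]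
    unfold PySem.Str.slice
    simp [pysem, PySem.Str.len]
  | cons p rest ih =>
    simp only [pvAStrip, pvBProto]
    split_ifs with h
    · rfl
    · exact ih

-- find of a single character = length of the (≠ c)-prefix
theorem find_eq_of (l sub : List Char) (n : Nat)
    (h1 : sub <+: l.drop n) (h2 : ∀ j < n, ¬ sub <+: l.drop j) :
    PySem.Chars.find l sub = (n : Int) := by
  have hinf : sub <:+: l := h1.isInfix.trans (List.drop_suffix n l).isInfix
  have h0 : 0 ≤ PySem.Chars.find l sub := (PySem.Chars.find_nonneg_iff l sub).2 hinf
  obtain ⟨hpre, hmin⟩ := PySem.Chars.find_spec (s := l) (sub := sub) h0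
  rcases Nat.lt_trichotomy (PySem.Chars.find l sub).toNat n with h | h | h
  · exact absurd hpre (h2 _ h)
  · omega
  · exact absurd h1 (hmin n h)

theorem singleton_prefix_iff (c : Char) (l : List Char) : ([c] <+: l) ↔ l.head? = some c := by
  cases l <;> simp [List.cons_prefix_cons, eq_comm]

theorem take_len_takeWhile (p : Char → Bool) (l : List Char) :
    l.take (l.takeWhile p).length = l.takeWhile p := by
  induction l with
  | nil => rfl
  | cons a t ih => by_cases h : p a <;> simp [h, ih]

theorem drop_len_takeWhile (p : Char → Bool) (l : List Char) :
    l.drop (l.takeWhile p).length = l.dropWhile p := by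
  induction l with
  | nil => rfl
  | cons a t ih => by_cases h : p a <;> simp [h, ih]

theorem find_singleton (l : List Char) (c : Char) :
    PySem.Chars.find l [c] =
      if c ∈ l then ((l.takeWhile (· ≠ c)).length : Int) else -1 := by
  by_cases hm : c ∈ l
  · simp only [hm, if_true]
    apply find_eq_of
    · rw [drop_len_takeWhile, singleton_prefix_iff]
      have hne : l.dropWhile (fun x => decide (x ≠ c)) ≠ [] := by
        intro h
        have h2 := List.takeWhile_append_dropWhile (p := fun x => decide (x ≠ c)) (l := l)
        rw [h, List.append_nil] at h2
        have h3 := List.mem_takeWhile_imp (p := fun x => decide (x ≠ c)) (h2 ▸ hm)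
        simp at h3
      have hh := List.head_dropWhile_not (p := fun x => decide (x ≠ c)) hne
      simp only [decide_not] at hh
      rw [List.head?_eq_some_head hne]
      simpa using hh
    · intro j hj hpre
      rw [singleton_prefix_iff] at hpre
      have hj' : j < l.length := lt_of_lt_of_le hj (by
        simpa using (List.takeWhile_sublist _).length_le)
      rw [List.head?_drop, List.getElem?_eq_getElem hj'] at hpre
      have heq : (l.takeWhile (fun x => decide (x ≠ c)))[j]'hj = l[j] :=
        (List.takeWhile_prefix _).getElem hj
      have hp := List.mem_takeWhile_imp (p := fun x => decide (x ≠ c))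
        (List.getElem_mem (l := l.takeWhile _) hj)
      rw [heq] at hp
      simp only [decide_eq_true_eq] at hp
      exact hp (Option.some.inj hpre)
  · simp only [hm, if_false]
    rw [PySem.Chars.find_eq_neg_one_iff]
    simpa [List.singleton_infix_iff] using hm

-- scan with port running: everything left is appended to the port buffer
theorem scan_some (l : List Char) (h p : List Char) :
    pvScan l true h (some p) = (h, some (p ++ l)) := by
  induction l generalizing p with
  | nil => simp [pvScan]
  | cons c cs ih => simp [pvScan, ih]

-- scan after the '@'-decision: host = up to the first ':', port = after it (if any)
theorem scan_true (l : List Char) (h : List Char) :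
    pvScan l true h none =
      (h ++ l.takeWhile (· ≠ ':'),
       if ':' ∈ l then some ((l.dropWhile (· ≠ ':')).drop 1) else none) := by
  induction l generalizing h with
  | nil => simp [pvScan]
  | cons c cs ih =>
    by_cases hc : c = ':'
    · simp [pvScan, hc, scan_some]
    · simp [pvScan, hc, ih, Ne.symm hc]

-- scan with seen_at still false: the first '@' (if any) resets the state
theorem scan_false (l : List Char) (h : List Char) (p? : Option (List Char)) :
    pvScan l false h p? =
      if '@' ∈ l then pvScan ((l.dropWhile (· ≠ '@')).drop 1) true [] none
      else pvScan l true h p? := by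
  induction l generalizing h p? with
  | nil => simp [pvScan]
  | cons c cs ih =>
    by_cases hc : c = '@'
    · simp [pvScan, hc]
    · have hmem : ('@' ∈ c :: cs) ↔ ('@' ∈ cs) := by simp [Ne.symm hc]
      by_cases hm : '@' ∈ cs
      · match p? with
        | some p => simp [pvScan, hc, ih, hmem, hm]
        | none =>
          by_cases hcol : c = ':' <;> simp [pvScan, hc, hcol, ih, hmem, hm]
      · match p? with
        | some p => simp [pvScan, hc, ih, hmem, hm]
        | none =>
          by_cases hcol : c = ':' <;> simp [pvScan, hc, hcol, ih, hmem, hm]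

-- A's truthiness filterMap over [proto, host, optional port] = B's ≠""-filter over parts
theorem truthy_filter (p h : String) (q? : Option String) :
    ([some p, some h, q?]).filterMap
      (fun o => match o with
        | none => none
        | some s => if s = "" then none else some s) =
    ([p, h] ++ (match q? with | some q => [q] | none => [])).filter (fun s => s ≠ "") := by
  cases q? with
  | none => by_cases hp : p = "" <;> by_cases hh : h = "" <;> simp [hp, hh]
  | some q =>
    by_cases hp : p = "" <;> by_cases hh : h = "" <;> by_cases hq : q = "" <;>
      simp [hp, hh, hq]

-- proof-local abbreviations: the remainder after the first '@', and A's host/port stage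
def pvL2 (l : List Char) : List Char :=
  if '@' ∈ l then (l.dropWhile (· ≠ '@')).drop 1 else l

def pvATail (u : String) : String × Option String :=
  let uri2 := PySem.Str.slice u (some (PySem.Str.find u "@" + 1)) none
  let credPos := PySem.Str.find uri2 ":"
  if credPos = -1 then (uri2, none)
  else (PySem.Str.slice uri2 none (some credPos),
        some (PySem.Str.slice uri2 (some (credPos + 1)) none))

-- A's '@'-strip slice, at the character level
theorem at_slice (u : String) :
    PySem.Str.slice u (some (PySem.Str.find u "@" + 1)) none
      = String.ofList (pvL2 u.toList) := by
  apply String.toList_inj.mp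
  rw [String.toList_ofList]
  have hfindAt : PySem.Str.find u "@" = PySem.Chars.find u.toList ['@'] := by simp [pysem]
  unfold pvL2
  by_cases hm : '@' ∈ u.toList
  · rw [hfindAt, find_singleton, if_pos hm, if_pos hm]
    have hcast : ((u.toList.takeWhile (· ≠ '@')).length : Int) + 1
        = (((u.toList.takeWhile (· ≠ '@')).length + 1 : Nat) : Int) := by push_cast; ring
    rw [hcast]
    simp only [PySem.Str.toList_slice, PySem.Chars.slice_eq_listSlice]
    rw [PySem.List.slice_from_natCast, ← drop_len_takeWhile, ← List.drop_drop]
  · rw [hfindAt, find_singleton, if_neg hm, if_neg hm]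
    norm_num

-- B's scan, reduced to takeWhile/dropWhile after the first '@'
theorem scan_eq (l : List Char) :
    pvScan l false [] none =
      ((pvL2 l).takeWhile (· ≠ ':'),
       if ':' ∈ pvL2 l then some (((pvL2 l).dropWhile (· ≠ ':')).drop 1) else none) := by
  rw [scan_false]
  unfold pvL2
  by_cases hm : '@' ∈ l
  · rw [if_pos hm, if_pos hm, scan_true]
    simp
  · rw [if_neg hm, if_neg hm, scan_true]
    simp

-- A's host/port stage equals the scan's result
theorem stage_eq (u : String) :
    pvATail u = (String.ofList (pvScan u.toList false [] none).1,
                 Option.map String.ofList (pvScan u.toList false [] none).2) := by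
  rw [scan_eq]
  unfold pvATail
  dsimp only
  rw [at_slice]
  have hfind2 : PySem.Str.find (String.ofList (pvL2 u.toList)) ":"
      = PySem.Chars.find (pvL2 u.toList) [':'] := by simp [pysem]
  by_cases hc : ':' ∈ pvL2 u.toList
  · rw [hfind2, find_singleton, if_pos hc,
      if_neg (by omega : ¬((((pvL2 u.toList).takeWhile (· ≠ ':')).length : Int) = -1))]
    simp only [if_pos hc, Option.map_some]
    rw [Prod.mk.injEq]
    refine ⟨?_, ?_⟩
    · apply String.toList_inj.mp
      rw [String.toList_ofList]
      simp only [PySem.Str.toList_slice, PySem.Chars.slice_eq_listSlice]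
      rw [String.toList_ofList, PySem.List.slice_to_natCast, take_len_takeWhile]
    · rw [Option.some.injEq]
      apply String.toList_inj.mp
      rw [String.toList_ofList]
      have hcast : ((((pvL2 u.toList).takeWhile (· ≠ ':')).length : Int) + 1)
          = ((((pvL2 u.toList).takeWhile (· ≠ ':')).length + 1 : Nat) : Int) := by push_cast; ring
      rw [hcast]
      simp only [PySem.Str.toList_slice, PySem.Chars.slice_eq_listSlice]
      rw [String.toList_ofList, PySem.List.slice_from_natCast, ← drop_len_takeWhile,
        ← List.drop_drop]
  · rw [hfind2, find_singleton, if_neg hc, if_pos rfl]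
    simp only [if_neg hc, Option.map_none]
    have htw : (pvL2 u.toList).takeWhile (· ≠ ':') = pvL2 u.toList := by
      rw [List.takeWhile_eq_self_iff]
      intro x hx
      simp [ne_of_mem_of_not_mem hx hc]
    rw [htw]

-- the shared tail of the two ports agrees
theorem tail_eq (proto u : String) :
    (let uri2 := PySem.Str.slice u (some (PySem.Str.find u "@" + 1)) none
     let credPos := PySem.Str.find uri2 ":"
     let hp : String × Option String :=
       if credPos = -1 then (uri2, none)
       else (PySem.Str.slice uri2 none (some credPos),
             some (PySem.Str.slice uri2 (some (credPos + 1)) none))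
     ([some proto, some hp.1, hp.2]).filterMap
       (fun o => match o with
         | none => none
         | some s => if s = "" then none else some s)) =
    (let hp := pvScan u.toList false [] none
     ([proto, String.ofList hp.1] ++
       (match hp.2 with | some p => [String.ofList p] | none => [])).filter
       (fun s => s ≠ "")) := by
  show ([some proto, some (pvATail u).1, (pvATail u).2]).filterMap
       (fun o => match o with
         | none => none
         | some s => if s = "" then none else some s)
    = ([proto, String.ofList (pvScan u.toList false [] none).1] ++
       (match (pvScan u.toList false [] none).2 with
        | some p => [String.ofList p] | none => [])).filter (fun s => s ≠ "")
  rw [stage_eq]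
  rcases hscan : pvScan u.toList false [] none with ⟨h, p?⟩
  cases p? with
  | none => exact truthy_filter proto (String.ofList h) none
  | some p => exact truthy_filter proto (String.ofList h) (some (String.ofList p))

-- ===== VERDICT (by name: the statement is the Claim_ definition above) =====
theorem uri_filter_spec : Claim_equal_uri_filter := by
  intro uri _
  unfold Spec_uri_filter uri_filter uri_filter_alt
  by_cases h0 : uri = ""
  · simp [h0]
  · simp only [h0, if_false, pvStrip_eq]
    exact tail_eq _ _
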